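-- pv_equiv track=rewrite | github.com/XyzHuy/-DL-Fine-tuning-coding-model | data/solution/Solution3116.py | findKthSmallest
-- ===== SOURCE A (Python) =====
-- from typing import List
-- from math import gcd
-- from functools import reduce
--
-- def findKthSmallest(coins: List[int], k: int) -> int:
--     def lcm(a, b):
--         return a * b // gcd(a, b)
--
--     def lcm_multiple(numbers):
--         return reduce(lcm, numbers)
--
--     def count_multiples(limit):
--         count = 0
--         for i in range(1, 1 << len(coins)):
--             current_lcm = 1
--             sign = -1
--             for j in range(len(coins)):
--                 if i & (1 << j):
--                     current_lcm = lcm_multiple([current_lcm, coins[j]])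
--                     sign *= -1
--             count += sign * (limit // current_lcm)
--         return count
--
--     low, high = 1, 2 * 10**9
--     while low < high:
--         mid = (low + high) // 2
--         if count_multiples(mid) < k:
--             low = mid + 1
--         else:
--             high = mid
--     return low
-- ===== SOURCE B (Python) =====
-- from typing import List
-- from math import gcd
--
-- def findKthSmallest(coins: List[int], k: int) -> int:
--     # Inclusion-exclusion by a depth-first recursion over the coin list:
--     # each coin either joins the current subset (lcm updated, sign flipped)
--     # or not.  dfs sums sign * (limit // lcm) over ALL subsets including the
--     # empty one (which contributes -limit), so count adds limit back.
--     def dfs(cs, l, s, limit):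
--         if not cs:
--             return s * (limit // l)
--         c = cs[0]
--         return dfs(cs[1:], l, s, limit) + dfs(cs[1:], l * c // gcd(l, c), -s, limit)
--
--     def count(limit):
--         return limit + dfs(coins, 1, -1, limit)
--
--     def search(low, high):
--         if low >= high:
--             return low
--         mid = (low + high) // 2
--         if count(mid) < k:
--             return search(mid + 1, high)
--         return search(low, mid)
--
--     return search(1, 2 * 10**9)
-- ===== Notes on version B (the rewrite author's own statement) =====
-- stated objective: alternative
-- what changed: B replaces A's bitmask enumeration (for every mask in [1,2^n) re-deriving the subset via an inner bit-test loop with reduce-based LCMs) by a branch-on-each-coin depth-first recursion that carries the running lcm and sign down the subset tree (one gcd per tree node instead of one per set bit), and replaces the while-loop binary search by a recursive one.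
import Mathlib
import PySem

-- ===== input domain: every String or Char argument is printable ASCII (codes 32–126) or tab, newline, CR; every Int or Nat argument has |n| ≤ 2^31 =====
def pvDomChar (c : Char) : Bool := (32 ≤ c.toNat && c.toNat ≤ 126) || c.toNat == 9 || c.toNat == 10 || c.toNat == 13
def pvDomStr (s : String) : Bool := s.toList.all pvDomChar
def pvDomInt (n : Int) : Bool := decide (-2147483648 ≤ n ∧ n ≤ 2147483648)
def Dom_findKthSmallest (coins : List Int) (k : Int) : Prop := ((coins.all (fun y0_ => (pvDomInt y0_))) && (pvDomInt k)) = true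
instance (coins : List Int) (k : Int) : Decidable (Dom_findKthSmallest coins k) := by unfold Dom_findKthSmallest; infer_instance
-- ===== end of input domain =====

-- B counts by a depth-first recursion over the coin list (carrying the running
-- lcm and inclusion-exclusion sign) instead of A's bitmask enumeration, and its
-- binary search is recursive.

-- midpoint bounds, cited by the ports' decreasing_by
theorem pvMid_ge (lo hi : Int) (h : lo < hi) : lo ≤ PySem.Int.floordiv (lo + hi) 2 :=
  (PySem.Int.floordiv_two_mid_bounds (le_of_lt h)).1
theorem pvMid_lt (lo hi : Int) (h : lo < hi) : PySem.Int.floordiv (lo + hi) 2 < hi := by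
  rw [PySem.Int.floordiv_lt_iff_lt_mul (by omega : (0:Int) < 2)]; omega

-- ===== PORT A =====
-- lcm(a, b) = a * b // gcd(a, b)  (Python // via PySem.Int.floordiv; math.gcd = Int.gcd, nonnegative)
def pyLcmA (a b : Int) : Int := PySem.Int.floordiv (a * b) (Int.gcd a b)

-- functools.reduce(lcm, numbers); Python raises on [], A only calls it on two-element lists
def lcmMultipleA : List Int → Int
  | [] => 0
  | x :: xs => xs.foldl pyLcmA x

-- the inner 'for j in range(len(coins))' loop of count_multiples, from state (current_lcm, sign)
-- (i and j are nonnegative loop counters, ported as Nat; coins[j] with j < len(coins) is coins.getD j 0, exact)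
def innerA (coins : List Int) (i : Nat) (p : Int × Int) : Int × Int :=
  (List.range coins.length).foldl
    (fun (p : Int × Int) j =>
      if i &&& (1 <<< j) ≠ 0 then (lcmMultipleA [p.1, coins.getD j 0], p.2 * (-1)) else p) p

-- count_multiples: for i in range(1, 1 << len(coins)), starting from (1, -1)
def countMultiplesA (coins : List Int) (limit : Int) : Int :=
  (List.range' 1 (2 ^ coins.length - 1)).foldl
    (fun count i =>
      let p := innerA coins i (1, -1)
      count + p.2 * PySem.Int.floordiv limit p.1) 0

-- the while-loop of the binary search
def bsearchA (coins : List Int) (k low high : Int) : Int :=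
  if h : low < high then
    let mid := PySem.Int.floordiv (low + high) 2
    if countMultiplesA coins mid < k then bsearchA coins k (mid + 1) high
    else bsearchA coins k low mid
  else low
termination_by (high - low).toNat
decreasing_by
  · have h1 := pvMid_ge low high h
    have h2 := pvMid_lt low high h
    omega
  · have h1 := pvMid_ge low high h
    have h2 := pvMid_lt low high h
    omega

def findKthSmallest (coins : List Int) (k : Int) : Int :=
  bsearchA coins k 1 (2 * 10 ^ 9)

-- ===== PORT B =====
-- dfs(cs, l, s, limit): each coin either joins the current subset (lcm updated via
-- l * c // gcd(l, c), sign flipped) or not; leaves contribute s * (limit // l)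
def dfsB (limit : Int) : List Int → Int → Int → Int
  | [], l, s => s * PySem.Int.floordiv limit l
  | c :: rest, l, s =>
      dfsB limit rest l s + dfsB limit rest (PySem.Int.floordiv (l * c) (Int.gcd l c)) (-s)

-- count(limit) = limit + dfs(coins, 1, -1, limit)
def countBfun (coins : List Int) (limit : Int) : Int :=
  limit + dfsB limit coins 1 (-1)

-- the recursive binary search of B
def bsearchB (coins : List Int) (k low high : Int) : Int :=
  if h : low < high then
    let mid := PySem.Int.floordiv (low + high) 2
    if countBfun coins mid < k then bsearchB coins k (mid + 1) high
    else bsearchB coins k low mid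
  else low
termination_by (high - low).toNat
decreasing_by
  · have h1 := pvMid_ge low high h
    have h2 := pvMid_lt low high h
    omega
  · have h1 := pvMid_ge low high h
    have h2 := pvMid_lt low high h
    omega

def findKthSmallest_alt (coins : List Int) (k : Int) : Int :=
  bsearchB coins k 1 (2 * 10 ^ 9)

-- ===== PRECONDITION & SPEC =====
-- Pre_ excludes exactly the inputs where Python A raises: a coin equal to 0 makes some
-- subset LCM zero and 'limit // current_lcm' raises ZeroDivisionError (B raises there too).
def Pre_findKthSmallest (coins : List Int) (k : Int) : Prop := (0 : Int) ∉ coins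
instance (coins : List Int) (k : Int) : Decidable (Pre_findKthSmallest coins k) := by
  unfold Pre_findKthSmallest; infer_instance

def pvWitness_findKthSmallest : List Int × Int := ([3, 5], 4)

def Spec_findKthSmallest (coins : List Int) (k : Int) (out : Int) : Prop := out = findKthSmallest_alt coins k
instance (coins : List Int) (k : Int) (out : Int) : Decidable (Spec_findKthSmallest coins k out) := by unfold Spec_findKthSmallest; infer_instance

-- ===== CLAIM (what is proved, stated in full; the proofs are below) =====
def Claim_equal_findKthSmallest : Prop := ∀ (coins : List Int) (k : Int), Dom_findKthSmallest coins k → Pre_findKthSmallest coins k → Spec_findKthSmallest coins k (findKthSmallest coins k)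

-- ===== LEMMAS AND PROOFS =====

-- the term A adds for bitmask i, started from state (l, s)
def termA (coins : List Int) (limit : Int) (l s : Int) (i : Nat) : Int :=
  (innerA coins i (l, s)).2 * PySem.Int.floordiv limit (innerA coins i (l, s)).1

-- n &&& 2^j ≠ 0 ↔ bit j of n
theorem and_shift_ne (n j : Nat) : (n &&& (1 <<< j) ≠ 0) ↔ n.testBit j := by
  rw [Nat.one_shiftLeft, Nat.and_two_pow]
  cases h : n.testBit j <;> simp

-- mask 0 selects nothing: the inner loop keeps its state
theorem innerA_zero (coins : List Int) (p : Int × Int) : innerA coins 0 p = p := by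
  unfold innerA
  induction List.range coins.length generalizing p with
  | nil => rfl
  | cons j js ih =>
      rw [List.foldl_cons, if_neg (by simp)]
      exact ih p

-- even mask over c::rest = the mask's upper bits over rest, same state
theorem innerA_even (c : Int) (rest : List Int) (i : Nat) (p : Int × Int) :
    innerA (c :: rest) (2 * i) (p) = innerA rest i p := by
  unfold innerA
  simp only [List.length_cons, List.range_succ_eq_map, List.foldl_cons, List.foldl_map]
  rw [if_neg (by rw [and_shift_ne]; simp [Nat.testBit_zero, Nat.mul_mod_right])]
  apply List.foldl_ext
  intro q j _
  have hb : (2 * i &&& 1 <<< (j + 1) ≠ 0) ↔ (i &&& 1 <<< j ≠ 0) := by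
    rw [and_shift_ne, and_shift_ne, Nat.testBit_add_one, Nat.mul_div_cancel_left _ (by norm_num)]
  simp only [List.getD_cons_succ]
  by_cases h : i &&& 1 <<< j ≠ 0
  · rw [if_pos h, if_pos (hb.mpr h)]
  · rw [if_neg h, if_neg (fun hc => h (hb.mp hc))]

-- odd mask over c::rest = the mask's upper bits over rest, with c folded in and the sign flipped
theorem innerA_odd (c : Int) (rest : List Int) (i : Nat) (l s : Int) :
    innerA (c :: rest) (2 * i + 1) (l, s)
      = innerA rest i (PySem.Int.floordiv (l * c) (Int.gcd l c), -s) := by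
  unfold innerA
  simp only [List.length_cons, List.range_succ_eq_map, List.foldl_cons, List.foldl_map]
  rw [if_pos (by rw [and_shift_ne]; simp [Nat.testBit_zero])]
  have h1 : lcmMultipleA [l, (c :: rest).getD 0 0] = PySem.Int.floordiv (l * c) (Int.gcd l c) := by
    simp [lcmMultipleA, pyLcmA]
  have h2 : s * (-1) = -s := by ring
  rw [h1, h2]
  apply List.foldl_ext
  intro q j _
  have hb : (2 * i + 1 &&& 1 <<< (j + 1) ≠ 0) ↔ (i &&& 1 <<< j ≠ 0) := by
    rw [and_shift_ne, and_shift_ne, Nat.testBit_add_one]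
    have hd : (2 * i + 1) / 2 = i := by omega
    rw [hd]
  simp only [List.getD_cons_succ]
  by_cases h : i &&& 1 <<< j ≠ 0
  · rw [if_pos h, if_pos (hb.mpr h)]
  · rw [if_neg h, if_neg (fun hc => h (hb.mp hc))]

-- summing f over [0, 2m) = summing f(2i) + f(2i+1) over [0, m)
theorem sum_range_double (f : Nat → Int) (m : Nat) :
    ((List.range (2 * m)).map f).sum
      = ((List.range m).map (fun i => f (2 * i) + f (2 * i + 1))).sum := by
  induction m with
  | zero => rfl
  | succ m ih =>
      have h2 : 2 * (m + 1) = (2 * m + 1) + 1 := by ring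
      rw [h2, List.range_succ, List.range_succ, List.range_succ]
      simp only [List.map_append, List.sum_append, List.map_cons, List.map_nil,
        List.sum_cons, List.sum_nil, ih]
      ring

-- KEY: A's sum of per-mask terms over all masks of coins equals B's dfs
theorem sum_termA_eq_dfsB (coins : List Int) (limit : Int) :
    ∀ (l s : Int),
      ((List.range (2 ^ coins.length)).map (termA coins limit l s)).sum = dfsB limit coins l s := by
  induction coins with
  | nil =>
      intro l s
      simp [termA, innerA, dfsB]
  | cons c rest ih =>
      intro l s
      have hp : 2 ^ (c :: rest).length = 2 * 2 ^ rest.length := by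
        simp [List.length_cons, pow_succ]; ring
      rw [hp, sum_range_double]
      have he : ∀ i : Nat,
          termA (c :: rest) limit l s (2 * i) + termA (c :: rest) limit l s (2 * i + 1)
            = termA rest limit l s i
              + termA rest limit (PySem.Int.floordiv (l * c) (Int.gcd l c)) (-s) i := by
        intro i
        unfold termA
        rw [innerA_even, innerA_odd]
      rw [List.map_congr_left (fun i _ => he i)]
      rw [PySem.List.sum_map_add_int]
      rw [ih l s, ih (PySem.Int.floordiv (l * c) (Int.gcd l c)) (-s)]
      rfl

-- per-probe counts agree
theorem count_eq (coins : List Int) (limit : Int) :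
    countMultiplesA coins limit = countBfun coins limit := by
  unfold countMultiplesA countBfun
  rw [PySem.List.foldl_add (g := fun i =>
    (let p := innerA coins i (1, -1)
     p.2 * PySem.Int.floordiv limit p.1))]
  have hs : (List.range' 1 (2 ^ coins.length - 1)).map
      (fun i => (let p := innerA coins i (1, -1); p.2 * PySem.Int.floordiv limit p.1))
      = (List.range' 1 (2 ^ coins.length - 1)).map (termA coins limit 1 (-1)) := by
    apply List.map_congr_left
    intro i _
    simp [termA]
  have hr : List.range (2 ^ coins.length) = 0 :: List.range' 1 (2 ^ coins.length - 1) := by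
    rw [List.range_eq_range']
    have : 2 ^ coins.length = (2 ^ coins.length - 1) + 1 :=
      (Nat.succ_pred_eq_of_pos (Nat.two_pow_pos _)).symm
    rw [this, List.range'_succ]
    simp
  have h0 : termA coins limit 1 (-1) 0 = -limit := by
    unfold termA
    rw [innerA_zero]
    have hf : PySem.Int.floordiv limit 1 = limit := by
      rw [PySem.Int.floordiv_eq_ediv_of_pos (by norm_num)]; exact Int.ediv_one limit
    rw [hf]; ring
  have hkey := sum_termA_eq_dfsB coins limit 1 (-1)
  rw [hr, List.map_cons, List.sum_cons, h0] at hkey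
  rw [hs]
  omega

-- the two binary searches coincide (their probe counts agree at every midpoint)
theorem bsearch_eq (coins : List Int) (k : Int) (low high : Int) :
    bsearchA coins k low high = bsearchB coins k low high := by
  rw [bsearchA, bsearchB]
  by_cases h : low < high
  · simp only [dif_pos h, count_eq]
    split
    · exact bsearch_eq coins k _ high
    · exact bsearch_eq coins k low _
  · simp [dif_neg h]
termination_by (high - low).toNat
decreasing_by
  · have h1 := pvMid_ge low high h
    have h2 := pvMid_lt low high h
    omega
  · have h1 := pvMid_ge low high h
    have h2 := pvMid_lt low high h
    omega

-- ===== VERDICT (by name: the statement is the Claim_ definition above) =====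
theorem findKthSmallest_spec : Claim_equal_findKthSmallest := by
  intro coins k _ _
  unfold Spec_findKthSmallest findKthSmallest findKthSmallest_alt
  exact bsearch_eq coins k 1 (2 * 10 ^ 9)
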